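-- pv_equiv track=rewrite | github.com/tiltowait/inconnu | inconnu/rousemorse.py | __count_successes
-- ===== SOURCE A (Python) =====
-- def __count_successes(dice: list) -> tuple:
--     """Count the number of successes and tens in a batch of dice."""
--     successes = 0
--     tens = 0
--     ones = 0
--
--     for die in dice:
--         if die >= 6:
--             successes += 1
--             if die == 10:
--                 tens += 1
--         elif die == 1:
--             ones += 1
--
--     return (ones, successes, tens)
-- ===== SOURCE B (Python) =====
-- def __count_successes(dice: list) -> tuple:
--     """Count ones, successes and tens in a batch of dice (three filtered passes)."""
--     ones = sum(1 for d in dice if d == 1)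
--     successes = sum(1 for d in dice if d >= 6)
--     tens = sum(1 for d in dice if d == 10)
--     return (ones, successes, tens)
-- ===== Notes on version B (the rewrite author's own statement) =====
-- stated objective: simpler
-- what changed: Replaces the single stateful loop with nested branches by three independent filtered-count passes (sum over generator expressions), relying on 1 < 6 and 10 >= 6 to make the branch structure unnecessary.
import Mathlib
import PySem

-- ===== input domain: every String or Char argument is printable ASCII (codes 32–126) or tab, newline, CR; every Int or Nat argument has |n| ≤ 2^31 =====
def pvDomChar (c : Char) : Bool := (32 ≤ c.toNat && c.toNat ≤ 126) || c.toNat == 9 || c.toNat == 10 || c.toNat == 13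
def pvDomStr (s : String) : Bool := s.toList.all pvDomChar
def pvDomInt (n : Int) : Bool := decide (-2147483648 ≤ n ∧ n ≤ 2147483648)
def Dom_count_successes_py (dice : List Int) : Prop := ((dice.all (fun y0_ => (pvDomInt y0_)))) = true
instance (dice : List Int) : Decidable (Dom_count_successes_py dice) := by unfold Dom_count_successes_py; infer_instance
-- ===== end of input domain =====

-- B replaces A's single stateful loop with nested branches by three independent
-- filtered-count passes; same O(n) cost, simpler structure.

-- ===== PORT A =====
-- A: one fold over (successes, tens, ones) mirroring the loop's branch order.
def count_successes_py (dice : List Int) : Int × Int × Int :=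
  let st := dice.foldl (fun (st : Int × Int × Int) (die : Int) =>
    let (successes, tens, ones) := st
    if die ≥ 6 then
      (successes + 1, if die = 10 then tens + 1 else tens, ones)
    else if die = 1 then
      (successes, tens, ones + 1)
    else
      (successes, tens, ones)) (0, 0, 0)
  (st.2.2, st.1, st.2.1)

-- ===== PORT B =====
-- B: three independent filtered counts (sum over generator expressions).
def count_successes_py_alt (dice : List Int) : Int × Int × Int :=
  let ones : Int := (dice.filter (fun d => d = 1)).length
  let successes : Int := (dice.filter (fun d => d ≥ 6)).length
  let tens : Int := (dice.filter (fun d => d = 10)).length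
  (ones, successes, tens)

-- ===== PRECONDITION & SPEC =====
def Spec_count_successes_py (dice : List Int) (out : Int × Int × Int) : Prop := out = count_successes_py_alt dice
instance (dice : List Int) (out : Int × Int × Int) : Decidable (Spec_count_successes_py dice out) := by unfold Spec_count_successes_py; infer_instance

-- ===== CLAIM (what is proved, stated in full; the proofs are below) =====
def Claim_equal_count_successes_py : Prop := ∀ (dice : List Int), Dom_count_successes_py dice → Spec_count_successes_py dice (count_successes_py dice)

-- ===== LEMMAS AND PROOFS =====

-- Loop invariant: the fold starting from any state adds the three filtered counts.
theorem count_fold_inv (dice : List Int) (s t o : Int) :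
    dice.foldl (fun (st : Int × Int × Int) (die : Int) =>
      let (successes, tens, ones) := st
      if die ≥ 6 then
        (successes + 1, if die = 10 then tens + 1 else tens, ones)
      else if die = 1 then
        (successes, tens, ones + 1)
      else
        (successes, tens, ones)) (s, t, o)
    = (s + ((dice.filter (fun d => d ≥ 6)).length : Int),
       t + ((dice.filter (fun d => d = 10)).length : Int),
       o + ((dice.filter (fun d => d = 1)).length : Int)) := by
  induction dice generalizing s t o with
  | nil => simp
  | cons d rest ih =>
    simp only [List.foldl_cons, List.filter_cons]
    by_cases h6 : d ≥ 6 <;> by_cases h10 : d = 10 <;> by_cases h1 : d = 1 <;>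
      first
        | omega
        | (simp [ih, h6, h10, h1, Prod.mk.injEq]; done)
        | (simp [ih, h6, h10, h1, Prod.mk.injEq]; omega)

-- ===== VERDICT (by name: the statement is the Claim_ definition above) =====
theorem count_successes_py_spec : Claim_equal_count_successes_py := by
  intro dice _
  unfold Spec_count_successes_py count_successes_py count_successes_py_alt
  rw [count_fold_inv]
  simp
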